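-- pv_equiv track=rewrite | github.com/SaeYoshizaki/atcoder | utils/N新数/to_base_n.py | from_base_n
-- ===== SOURCE A (Python) =====
-- def from_base_n(s, N):
--     x = 0
--     power = 0
--     while s > 0:
--         x += (s % 10) * (N**power)
--         power += 1
--         s //= 10
--     return x
-- ===== SOURCE B (Python) =====
-- def from_base_n(s, N):
--     if s <= 0:
--         return 0
--     return from_base_n(s // 10, N) * N + s % 10
-- ===== Notes on version B (the rewrite author's own statement) =====
-- stated objective: simpler
-- what changed: Replaces the iterative least-significant-first sum with an explicit power accumulator by a short recursion on s//10 applying Horner's rule most-significant-digit first, with no power variable and no running x.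
import Mathlib
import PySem

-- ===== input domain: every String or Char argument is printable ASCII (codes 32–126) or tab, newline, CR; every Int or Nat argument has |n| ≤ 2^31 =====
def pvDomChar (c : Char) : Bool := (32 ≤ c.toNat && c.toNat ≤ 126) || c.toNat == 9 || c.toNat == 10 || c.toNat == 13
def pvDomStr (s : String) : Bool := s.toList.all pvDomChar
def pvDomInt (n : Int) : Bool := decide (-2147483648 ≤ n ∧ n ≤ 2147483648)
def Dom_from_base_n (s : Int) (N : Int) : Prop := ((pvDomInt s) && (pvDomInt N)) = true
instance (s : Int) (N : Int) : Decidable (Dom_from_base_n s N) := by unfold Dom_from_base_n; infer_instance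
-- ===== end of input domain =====

-- B replaces A's least-significant-first loop with an explicit power accumulator by a
-- direct Horner-style recursion on s // 10 (simpler: no power variable, no running sum).

-- ===== PORT A =====
-- the while loop: state (x, power, s); power stays ≥ 0 so it is kept as a Nat exponent
def from_base_n_loop (s : Int) (N : Int) (x : Int) (power : Nat) : Int :=
  if _h : s > 0 then
    from_base_n_loop (PySem.Int.floordiv s 10) N (x + (PySem.Int.mod s 10) * N ^ power) (power + 1)
  else x
termination_by s.toNat
decreasing_by
  rw [PySem.Int.floordiv_eq_ediv_of_pos (by omega : (0:Int) < 10)]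
  omega

def from_base_n (s : Int) (N : Int) : Int := from_base_n_loop s N 0 0

-- ===== PORT B =====
def from_base_n_alt (s : Int) (N : Int) : Int :=
  if _h : s ≤ 0 then 0
  else from_base_n_alt (PySem.Int.floordiv s 10) N * N + PySem.Int.mod s 10
termination_by s.toNat
decreasing_by
  rw [PySem.Int.floordiv_eq_ediv_of_pos (by omega : (0:Int) < 10)]
  omega

-- ===== PRECONDITION & SPEC =====
def Spec_from_base_n (s : Int) (N : Int) (out : Int) : Prop := out = from_base_n_alt s N
instance (s : Int) (N : Int) (out : Int) : Decidable (Spec_from_base_n s N out) := by unfold Spec_from_base_n; infer_instance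

-- ===== CLAIM (what is proved, stated in full; the proofs are below) =====
def Claim_equal_from_base_n : Prop := ∀ (s : Int) (N : Int), Dom_from_base_n s N → Spec_from_base_n s N (from_base_n s N)

-- ===== LEMMAS AND PROOFS =====

-- loop invariant: the remaining loop adds alt(s) · N^power to the accumulator
theorem from_base_n_loop_inv (n : Nat) (s : Int) (hn : s.toNat ≤ n) (N x : Int) (power : Nat) :
    from_base_n_loop s N x power = x + from_base_n_alt s N * N ^ power := by
  induction n generalizing s x power with
  | zero =>
    have hs : ¬ s > 0 := by omega
    rw [from_base_n_loop, from_base_n_alt]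
    simp [hs, show s ≤ 0 by omega]
  | succ n ih =>
    by_cases hs : s > 0
    · rw [from_base_n_loop, from_base_n_alt]
      simp only [hs, dif_pos, show ¬ s ≤ 0 by omega, dif_neg, not_false_iff]
      have hlt : (PySem.Int.floordiv s 10).toNat ≤ n := by
        rw [PySem.Int.floordiv_eq_ediv_of_pos (by omega : (0:Int) < 10)]
        omega
      rw [ih _ hlt]
      ring
    · rw [from_base_n_loop, from_base_n_alt]
      simp [hs, show s ≤ 0 by omega]

-- ===== VERDICT (by name: the statement is the Claim_ definition above) =====
theorem from_base_n_spec : Claim_equal_from_base_n := by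
  intro s N _
  show from_base_n s N = from_base_n_alt s N
  rw [from_base_n, from_base_n_loop_inv s.toNat s le_rfl]
  ring
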